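-- pv_equiv track=rewrite | github.com/Digital-AI-Finance/ML_Design_Thinking_16 | archive/weeks_original/Week_10/fix_texttt_final.py | fix_texttt_linebreaks
-- ===== SOURCE A (Python) =====
-- def fix_texttt_linebreaks(content):
--     result = []
--     i = 0
--     while i < len(content):
--         # Find next \texttt{
--         start = content.find('\\texttt{', i)
--         if start == -1:
--             # No more texttt blocks
--             result.append(content[i:])
--             break
--
--         # Add everything before \texttt{
--         result.append(content[i:start+8])  # include \texttt{
--
--         # Find matching }
--         brace_count = 1
--         j = start + 8
--         while j < len(content) and brace_count > 0:
--             if content[j] == '\\' and j+1 < len(content) and content[j+1] == '{':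
--                 # Escaped brace doesn't count
--                 j += 2
--                 continue
--             if content[j] == '{':
--                 brace_count += 1
--             elif content[j] == '}':
--                 brace_count -= 1
--             j += 1
--
--         # Extract texttt content
--         texttt_content = content[start+8:j-1]
--
--         # Replace \\ with actual newline for proper formatting
--         fixed_content = texttt_content.replace('\\\\', '\\newline\n')
--
--         result.append(fixed_content)
--         result.append('}')
--
--         i = j
--
--     return ''.join(result)
-- ===== SOURCE B (Python) =====
-- def fix_texttt_linebreaks(content):
--     out = []
--     i = 0
--     n = len(content)
--     while i < n:
--         if content.startswith('\\texttt{', i):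
--             # scan the block with a brace-depth counter, buffering what is consumed
--             out.append('\\texttt{')
--             i += 8
--             depth = 1
--             buf = []
--             while i < n and depth > 0:
--                 if content.startswith('\\{', i):
--                     buf.append('\\{')
--                     i += 2
--                     continue
--                 c = content[i]
--                 if c == '{':
--                     depth += 1
--                 elif c == '}':
--                     depth -= 1
--                 buf.append(c)
--                 i += 1
--             # the scan consumes through the closing brace; strip that final character
--             inner = ''.join(buf)[:-1]
--             out.append(inner.replace('\\\\', '\\newline\n'))
--             out.append('}')
--         else:
--             out.append(content[i])
--             i += 1
--     return ''.join(out)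
-- ===== Notes on version B (the rewrite author's own statement) =====
-- stated objective: alternative
-- what changed: Replaces A's outer find-next-occurrence loop plus slice extraction by index arithmetic with a single-pass two-state scanner over one index that copies characters outside blocks and buffers each block's scanned characters under a depth counter, stripping the consumed closing character before the per-block replacement.
import Mathlib
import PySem

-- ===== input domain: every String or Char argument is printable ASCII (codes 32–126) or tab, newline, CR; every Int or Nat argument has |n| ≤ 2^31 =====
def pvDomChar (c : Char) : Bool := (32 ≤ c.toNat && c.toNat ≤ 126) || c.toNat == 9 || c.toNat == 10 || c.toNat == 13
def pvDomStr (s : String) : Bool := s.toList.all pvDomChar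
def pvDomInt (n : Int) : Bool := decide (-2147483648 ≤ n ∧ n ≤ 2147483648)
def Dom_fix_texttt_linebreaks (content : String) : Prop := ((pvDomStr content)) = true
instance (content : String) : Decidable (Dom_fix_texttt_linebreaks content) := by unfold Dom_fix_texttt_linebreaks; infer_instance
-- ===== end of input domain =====

-- B replaces A's outer-find-plus-inner-brace-loop with a single-pass two-state scanner over one index that buffers each block's scanned characters (objective: alternative decomposition, same output).
-- Both while loops are ported with a structural fuel parameter initialised to length+1, which exceeds the loops' iteration counts (every iteration advances the index), so each port is exact.

-- ===== PORT A =====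
-- the 8-character block-opening pattern that both programs search for
def ttPat : List Char := ['\\', 't', 'e', 'x', 't', 't', 't', '{']

-- A's inner while loop: brace matching from index j with brace_count bc; returns the final j
def aScan (cs : List Char) : Nat → Nat → Nat → Nat
  | fuel+1, j, bc =>
    if h : j < cs.length ∧ 0 < bc then
      if cs[j]'h.1 = '\\' ∧ cs[j+1]? = some '{' then
        aScan cs fuel (j+2) bc
      else if cs[j]'h.1 = '{' then aScan cs fuel (j+1) (bc+1)
      else if cs[j]'h.1 = '}' then aScan cs fuel (j+1) (bc-1)
      else aScan cs fuel (j+1) bc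
    else j
  | 0, j, _ => j

-- A's outer while loop from index i; the pieces of `result` are concatenated as they are produced
def aLoop (cs : List Char) : Nat → Nat → List Char
  | fuel+1, i =>
    if i < cs.length then
      if PySem.Chars.findFrom cs ttPat (i : Int) none = -1 then
        cs.drop i      -- content[i:]
      else
        let start : Nat := (PySem.Chars.findFrom cs ttPat (i : Int) none).toNat
        let j : Nat := aScan cs (cs.length + 1) (start + 8) 1
        PySem.List.slice cs (some (i : Int)) (some ((start : Int) + 8))     -- content[i:start+8]
          ++ PySem.Chars.replace
               (PySem.List.slice cs (some ((start : Int) + 8)) (some ((j : Int) - 1)))  -- content[start+8:j-1]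
               ['\\', '\\'] "\\newline\n".toList
          ++ ['}']
          ++ aLoop cs fuel j
    else []
  | 0, _ => []

def fix_texttt_linebreaks (content : String) : String :=
  String.ofList (aLoop content.toList (content.toList.length + 1) 0)

-- ===== PORT B =====
-- B's inner while loop: index i, depth d, and the buffer of scanned chars; returns (buf, i)
def bScan (cs : List Char) : Nat → Nat → Nat → List Char → List Char × Nat
  | fuel+1, i, d, buf =>
    if h : i < cs.length ∧ 0 < d then
      if cs[i]'h.1 = '\\' ∧ cs[i+1]? = some '{' then
        bScan cs fuel (i+2) d (buf ++ ['\\', '{'])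
      else
        bScan cs fuel (i+1)
          (if cs[i]'h.1 = '{' then d+1 else if cs[i]'h.1 = '}' then d-1 else d)
          (buf ++ [cs[i]'h.1])
    else (buf, i)
  | 0, i, _, buf => (buf, i)

-- B's outer state machine (the Python startswith(pattern, i) test is ported as startswith on content[i:]; ''.join(buf)[:-1] is slice none (-1))
def bLoop (cs : List Char) : Nat → Nat → List Char
  | fuel+1, i =>
    if hi : i < cs.length then
      if PySem.Chars.startswith (cs.drop i) ttPat then
        let r := bScan cs (cs.length + 1) (i+8) 1 []
        ttPat
          ++ PySem.Chars.replace (PySem.List.slice r.1 none (some (-1)))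
               ['\\', '\\'] "\\newline\n".toList
          ++ ['}'] ++ bLoop cs fuel r.2
      else
        cs[i]'hi :: bLoop cs fuel (i+1)
    else []
  | 0, _ => []

def fix_texttt_linebreaks_alt (content : String) : String :=
  String.ofList (bLoop content.toList (content.toList.length + 1) 0)

-- ===== PRECONDITION & SPEC =====
def Spec_fix_texttt_linebreaks (content : String) (out : String) : Prop := out = fix_texttt_linebreaks_alt content
instance (content : String) (out : String) : Decidable (Spec_fix_texttt_linebreaks content out) := by
  unfold Spec_fix_texttt_linebreaks; infer_instance

-- ===== CLAIM (what is proved, stated in full; the proofs are below) =====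
def Claim_equal_fix_texttt_linebreaks : Prop := ∀ (content : String), Dom_fix_texttt_linebreaks content → Spec_fix_texttt_linebreaks content (fix_texttt_linebreaks content)

-- ===== LEMMAS AND PROOFS =====

lemma aScan_succ (cs : List Char) (fuel j bc : Nat) :
    aScan cs (fuel+1) j bc =
      if h : j < cs.length ∧ 0 < bc then
        if cs[j]'h.1 = '\\' ∧ cs[j+1]? = some '{' then
          aScan cs fuel (j+2) bc
        else if cs[j]'h.1 = '{' then aScan cs fuel (j+1) (bc+1)
        else if cs[j]'h.1 = '}' then aScan cs fuel (j+1) (bc-1)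
        else aScan cs fuel (j+1) bc
      else j := rfl

lemma bScan_succ (cs : List Char) (fuel i d : Nat) (buf : List Char) :
    bScan cs (fuel+1) i d buf =
      if h : i < cs.length ∧ 0 < d then
        if cs[i]'h.1 = '\\' ∧ cs[i+1]? = some '{' then
          bScan cs fuel (i+2) d (buf ++ ['\\', '{'])
        else
          bScan cs fuel (i+1)
            (if cs[i]'h.1 = '{' then d+1 else if cs[i]'h.1 = '}' then d-1 else d)
            (buf ++ [cs[i]'h.1])
      else (buf, i) := rfl

lemma aLoop_succ (cs : List Char) (fuel i : Nat) :
    aLoop cs (fuel+1) i =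
      if i < cs.length then
        if PySem.Chars.findFrom cs ttPat (i : Int) none = -1 then
          cs.drop i
        else
          PySem.List.slice cs (some (i : Int))
              (some (((PySem.Chars.findFrom cs ttPat (i : Int) none).toNat : Int) + 8))
            ++ PySem.Chars.replace
                 (PySem.List.slice cs
                   (some (((PySem.Chars.findFrom cs ttPat (i : Int) none).toNat : Int) + 8))
                   (some ((aScan cs (cs.length + 1) ((PySem.Chars.findFrom cs ttPat (i : Int) none).toNat + 8) 1 : Int) - 1)))
                 ['\\', '\\'] "\\newline\n".toList
            ++ ['}']
            ++ aLoop cs fuel (aScan cs (cs.length + 1) ((PySem.Chars.findFrom cs ttPat (i : Int) none).toNat + 8) 1)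
      else [] := rfl

lemma bLoop_succ (cs : List Char) (fuel i : Nat) :
    bLoop cs (fuel+1) i =
      if hi : i < cs.length then
        if PySem.Chars.startswith (cs.drop i) ttPat then
          ttPat
            ++ PySem.Chars.replace
                 (PySem.List.slice (bScan cs (cs.length + 1) (i+8) 1 []).1 none (some (-1)))
                 ['\\', '\\'] "\\newline\n".toList
            ++ ['}'] ++ bLoop cs fuel (bScan cs (cs.length + 1) (i+8) 1 []).2
        else
          cs[i]'hi :: bLoop cs fuel (i+1)
      else [] := rfl

lemma aScan_ge (cs : List Char) : ∀ (f j bc : Nat), j ≤ aScan cs f j bc := by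
  intro f
  induction f with
  | zero => intro j bc; exact Nat.le_refl j
  | succ f ih =>
    intro j bc
    rw [aScan_succ]
    by_cases h : j < cs.length ∧ 0 < bc
    · rw [dif_pos h]
      by_cases hs : cs[j]'h.1 = '\\' ∧ cs[j+1]? = some '{'
      · rw [if_pos hs]; have := ih (j+2) bc; omega
      · rw [if_neg hs]
        by_cases h1 : cs[j]'h.1 = '{'
        · rw [if_pos h1]; have := ih (j+1) (bc+1); omega
        · rw [if_neg h1]
          by_cases h2 : cs[j]'h.1 = '}'
          · rw [if_pos h2]; have := ih (j+1) (bc-1); omega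
          · rw [if_neg h2]; have := ih (j+1) bc; omega
    · rw [dif_neg h]

-- i ≤ a successful find(pat, i)
lemma findFrom_ge (cs pat : List Char) (i : Nat) (hi : i ≤ cs.length)
    (h : PySem.Chars.findFrom cs pat (i : Int) none ≠ -1) :
    i ≤ (PySem.Chars.findFrom cs pat (i : Int) none).toNat := by
  have := (PySem.Chars.findFrom_natCast_spec cs pat i hi h).1
  omega

lemma dropAdd (cs : List Char) (a b : Nat) : (cs.drop a).drop b = cs.drop (a + b) := by
  rw [List.drop_drop]

-- the two inner loops agree: B's buffer is exactly the span A's scan walks over, and both end at A's index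
lemma scan_spec (cs : List Char) : ∀ (fuel j d : Nat), cs.length - j ≤ fuel → j ≤ cs.length →
    (∀ buf, bScan cs fuel j d buf =
      (buf ++ (cs.drop j).take (aScan cs fuel j d - j), aScan cs fuel j d)) ∧
    aScan cs fuel j d ≤ cs.length := by
  intro fuel
  induction fuel with
  | zero =>
    intro j d hm hj
    refine ⟨?_, by simp [aScan]; omega⟩
    intro buf
    simp [bScan, aScan]
  | succ fuel ih =>
    intro j d hm hj
    by_cases h : j < cs.length ∧ 0 < d
    · have hjn := h.1
      have hcons : cs.drop j = cs[j]'hjn :: cs.drop (j+1) := List.drop_eq_getElem_cons hjn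
      by_cases hskip : cs[j]'hjn = '\\' ∧ cs[j+1]? = some '{'
      · -- escaped '\{' : both advance by 2
        have hjn2 : j + 1 < cs.length := (List.getElem?_eq_some_iff.1 hskip.2).1
        have hc1 : cs[j+1]'hjn2 = '{' := (List.getElem?_eq_some_iff.1 hskip.2).2
        have hcons2 : cs.drop j = '\\' :: '{' :: cs.drop (j+2) := by
          rw [hcons, List.drop_eq_getElem_cons hjn2, hskip.1, hc1]
        obtain ⟨h1, h2⟩ := ih (j+2) d (by omega) (by omega)
        have hA : aScan cs (fuel+1) j d = aScan cs fuel (j+2) d := by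
          rw [aScan_succ, dif_pos h, if_pos hskip]
        have hge := aScan_ge cs fuel (j+2) d
        refine ⟨?_, by omega⟩
        intro buf
        rw [bScan_succ, dif_pos h, if_pos hskip, h1 (buf ++ ['\\', '{']), hA, hcons2]
        have e : aScan cs fuel (j+2) d - j = (aScan cs fuel (j+2) d - (j+2)) + 1 + 1 := by omega
        rw [e, List.take_succ_cons, List.take_succ_cons]
        simp
      · -- a single scanned char: depth updates, index advances by 1
        have hstep : ∀ d', aScan cs (fuel+1) j d = aScan cs fuel (j+1) d' →
            (∀ buf, bScan cs (fuel+1) j d buf = bScan cs fuel (j+1) d' (buf ++ [cs[j]'hjn])) →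
            (∀ buf, bScan cs (fuel+1) j d buf =
              (buf ++ (cs.drop j).take (aScan cs (fuel+1) j d - j), aScan cs (fuel+1) j d)) ∧
            aScan cs (fuel+1) j d ≤ cs.length := by
          intro d' hA hB
          obtain ⟨h1, h2⟩ := ih (j+1) d' (by omega) (by omega)
          have hge := aScan_ge cs fuel (j+1) d'
          refine ⟨?_, by omega⟩
          intro buf
          rw [hB buf, h1 (buf ++ [cs[j]'hjn]), hA, hcons]
          have e : aScan cs fuel (j+1) d' - j = (aScan cs fuel (j+1) d' - (j+1)) + 1 := by omega
          rw [e, List.take_succ_cons]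
          simp
        exact hstep (if cs[j]'hjn = '{' then d+1 else if cs[j]'hjn = '}' then d-1 else d)
          (by rw [aScan_succ, dif_pos h, if_neg hskip]
              by_cases hbr : cs[j]'hjn = '{'
              · rw [if_pos hbr, if_pos hbr]
              · rw [if_neg hbr, if_neg hbr]
                by_cases hclose : cs[j]'hjn = '}'
                · rw [if_pos hclose, if_pos hclose]
                · rw [if_neg hclose, if_neg hclose])
          (by intro buf
              rw [bScan_succ, dif_pos h, if_neg hskip])
    · have hA : aScan cs (fuel+1) j d = j := by rw [aScan_succ, dif_neg h]
      refine ⟨?_, by rw [hA]; omega⟩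
      intro buf
      rw [bScan_succ, dif_neg h, hA]
      simp

-- find's first occurrence characterisation
lemma find_eq_of_first (cs pat : List Char) (m : Nat) (h1 : pat <+: cs.drop m)
    (h2 : ∀ k < m, ¬ pat <+: cs.drop k) : PySem.Chars.find cs pat = (m : Int) := by
  have hinf : pat <:+: cs := by
    obtain ⟨t, ht⟩ := h1
    exact ⟨cs.take m, t, by rw [List.append_assoc, ht, List.take_append_drop]⟩
  have hnn : 0 ≤ PySem.Chars.find cs pat := (PySem.Chars.find_nonneg_iff cs pat).2 hinf
  obtain ⟨hpre, hmin⟩ := PySem.Chars.find_spec hnn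
  rcases Nat.lt_trichotomy (PySem.Chars.find cs pat).toNat m with h | h | h
  · exact absurd hpre (h2 _ h)
  · omega
  · exact absurd h1 (hmin m h)

lemma aLoop_nil (cs : List Char) (f i : Nat) (h : cs.length ≤ i) : aLoop cs f i = [] := by
  cases f with
  | zero => rfl
  | succ f => rw [aLoop_succ, if_neg (by omega)]

lemma bLoop_nil (cs : List Char) (f i : Nat) (h : cs.length ≤ i) : bLoop cs f i = [] := by
  cases f with
  | zero => rfl
  | succ f => rw [bLoop_succ, dif_neg (by omega)]

-- aLoop does not depend on the fuel once the fuel dominates the remaining length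
lemma aLoop_fuel (cs : List Char) : ∀ (f g i : Nat), cs.length - i ≤ f → cs.length - i ≤ g →
    aLoop cs f i = aLoop cs g i := by
  intro f
  induction f with
  | zero =>
    intro g i hf hg
    rw [aLoop_nil cs 0 i (by omega), aLoop_nil cs g i (by omega)]
  | succ f ih =>
    intro g i hf hg
    by_cases hi : i < cs.length
    · obtain ⟨g', rfl⟩ : ∃ g', g = g' + 1 := ⟨g - 1, by omega⟩
      rw [aLoop_succ cs f i, aLoop_succ cs g' i]
      by_cases hfind : PySem.Chars.findFrom cs ttPat (i : Int) none = -1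
      · rw [if_pos hi, if_pos hi, if_pos hfind, if_pos hfind]
      · rw [if_pos hi, if_pos hi, if_neg hfind, if_neg hfind]
        have hs := findFrom_ge cs ttPat i (by omega) hfind
        have hj := aScan_ge cs (cs.length + 1)
          ((PySem.Chars.findFrom cs ttPat (i : Int) none).toNat + 8) 1
        have htail := ih g'
          (aScan cs (cs.length + 1) ((PySem.Chars.findFrom cs ttPat (i : Int) none).toNat + 8) 1)
          (by omega) (by omega)
        rw [htail]
    · rw [aLoop_nil cs _ i (by omega), aLoop_nil cs _ i (by omega)]

-- when i is not at an occurrence, A also steps exactly one char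
lemma aLoop_cons (cs : List Char) (f i : Nat) (hi : i < cs.length) (hf : cs.length - (i+1) ≤ f)
    (hpre : ¬ ttPat <+: cs.drop i) : aLoop cs (f+1) i = cs[i]'hi :: aLoop cs f (i+1) := by
  have hcons : cs.drop i = cs[i]'hi :: cs.drop (i+1) := List.drop_eq_getElem_cons hi
  have hF : PySem.Chars.findFrom cs ttPat (i : Int) none =
      if PySem.Chars.find (cs.drop i) ttPat = -1 then -1
      else (i : Int) + PySem.Chars.find (cs.drop i) ttPat :=
    PySem.Chars.findFrom_natCast cs ttPat i (by omega)
  by_cases hnone : PySem.Chars.find (cs.drop i) ttPat = -1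
  · -- no occurrence anywhere from i
    have hni : ¬ ttPat <:+: cs.drop i := (PySem.Chars.find_eq_neg_one_iff _ _).1 hnone
    have hni1 : ¬ ttPat <:+: cs.drop (i+1) := by
      intro h
      exact hni (h.trans (by rw [hcons]; exact (List.suffix_cons _ _).isInfix))
    rw [aLoop_succ, if_pos hi, if_pos (by rw [hF, if_pos hnone])]
    by_cases hi1 : i + 1 < cs.length
    · obtain ⟨f', rfl⟩ : ∃ f', f = f' + 1 := ⟨f - 1, by omega⟩
      rw [aLoop_succ, if_pos hi1,
        if_pos (by rw [PySem.Chars.findFrom_natCast cs ttPat (i+1) (by omega),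
          if_pos ((PySem.Chars.find_eq_neg_one_iff _ _).2 hni1)])]
      exact hcons
    · rw [aLoop_nil cs f (i+1) (by omega), hcons]
      congr 1
      exact List.drop_eq_nil_of_le (by omega)
  · -- first occurrence strictly after i: find shifts down by one
    have hnn : 0 ≤ PySem.Chars.find (cs.drop i) ttPat := by
      have := PySem.Chars.neg_one_le_find (cs.drop i) ttPat
      omega
    obtain ⟨hpre0, hmin0⟩ := PySem.Chars.find_spec hnn
    set fq : Nat := (PySem.Chars.find (cs.drop i) ttPat).toNat with hfq
    have hfval : PySem.Chars.find (cs.drop i) ttPat = (fq : Int) := by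
      rw [hfq, Int.toNat_of_nonneg hnn]
    have hfpos : 0 < fq := by
      by_contra h0
      have hf0 : fq = 0 := by omega
      rw [hf0, List.drop_zero] at hpre0
      exact hpre hpre0
    have hocc : ttPat <+: cs.drop (i + fq) := by
      rw [dropAdd] at hpre0
      exact hpre0
    have hlen : i + fq + 8 ≤ cs.length := by
      have hl := hocc.length_le
      simp [ttPat] at hl
      omega
    have hfind1 : PySem.Chars.find (cs.drop (i+1)) ttPat = ((fq - 1 : Nat) : Int) := by
      apply find_eq_of_first
      · rw [dropAdd]
        have e : i + 1 + (fq - 1) = i + fq := by omega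
        rw [e]
        exact hocc
      · intro k hk hcontra
        rw [dropAdd] at hcontra
        have hm := hmin0 (1+k) (by omega)
        rw [dropAdd] at hm
        have e : i + (1 + k) = i + 1 + k := by omega
        rw [e] at hm
        exact hm hcontra
    have hFi : PySem.Chars.findFrom cs ttPat (i : Int) none = ((i + fq : Nat) : Int) := by
      rw [hF, if_neg hnone, hfval]
      push_cast
      ring
    have hFi1 : PySem.Chars.findFrom cs ttPat ((i+1 : Nat) : Int) none = ((i + fq : Nat) : Int) := by
      rw [PySem.Chars.findFrom_natCast cs ttPat (i+1) (by omega),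
        if_neg (by rw [hfind1]; intro h; have := Int.natCast_nonneg (fq-1); omega), hfind1]
      push_cast
      omega
    have hi1 : i + 1 < cs.length := by omega
    obtain ⟨f', rfl⟩ : ∃ f', f = f' + 1 := ⟨f - 1, by omega⟩
    rw [aLoop_succ cs (f'+1) i, if_pos hi,
      if_neg (by rw [hFi]; intro h; have := Int.natCast_nonneg (i+fq); omega)]
    rw [aLoop_succ cs f' (i+1), if_pos hi1,
      if_neg (by rw [hFi1]; intro h; have := Int.natCast_nonneg (i+fq); omega)]
    simp only [hFi, hFi1, Int.toNat_natCast]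
    have hsc := aScan_ge cs (cs.length + 1) (i + fq + 8) 1
    have htail : aLoop cs (f'+1) (aScan cs (cs.length + 1) (i + fq + 8) 1) =
        aLoop cs f' (aScan cs (cs.length + 1) (i + fq + 8) 1) :=
      aLoop_fuel cs (f'+1) f' _ (by omega) (by omega)
    rw [htail]
    have hslice : PySem.List.slice cs (some (i : Int)) (some (((i + fq : Nat) : Int) + 8)) =
        cs[i]'hi :: PySem.List.slice cs (some ((i+1 : Nat) : Int)) (some (((i + fq : Nat) : Int) + 8)) := by
      have e8 : ((i + fq : Nat) : Int) + 8 = ((i + fq + 8 : Nat) : Int) := by push_cast; ring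
      rw [e8, PySem.List.slice_natCast, PySem.List.slice_natCast, hcons]
      have e : i + fq + 8 - i = (i + fq + 8 - (i+1)) + 1 := by omega
      rw [e, List.take_succ_cons]
    rw [hslice]
    simp

-- the outer loops agree
lemma loop_eq (cs : List Char) : ∀ (fuel i : Nat), cs.length - i ≤ fuel →
    aLoop cs fuel i = bLoop cs fuel i := by
  intro fuel
  induction fuel with
  | zero => intro i h; rfl
  | succ m ih =>
    intro i hm
    by_cases hi : i < cs.length
    · by_cases hpre : ttPat <+: cs.drop i
      · -- a block starts at i
        have hsw : PySem.Chars.startswith (cs.drop i) ttPat = true :=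
          (PySem.Chars.startswith_iff _ _).2 hpre
        obtain ⟨t, ht⟩ := hpre
        have hlen8 : i + 8 ≤ cs.length := by
          have := congrArg List.length ht
          simp [ttPat] at this
          omega
        have hfind0 : PySem.Chars.find (cs.drop i) ttPat = ((0 : Nat) : Int) := by
          apply find_eq_of_first
          · rw [List.drop_zero]
            exact ⟨t, ht⟩
          · intro k hk
            omega
        have hF : PySem.Chars.findFrom cs ttPat (i : Int) none = (i : Int) := by
          rw [PySem.Chars.findFrom_natCast cs ttPat i (by omega),
            if_neg (by rw [hfind0]; decide), hfind0]
          push_cast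
          ring
        rw [aLoop_succ, if_pos hi,
          if_neg (by rw [hF]; intro h; have := Int.natCast_nonneg i; omega)]
        rw [bLoop_succ, dif_pos hi, if_pos hsw]
        simp only [hF, Int.toNat_natCast]
        obtain ⟨h1, h2⟩ := scan_spec cs (cs.length + 1) (i+8) 1 (by omega) (by omega)
        have hb := h1 []
        have hge : i + 8 ≤ aScan cs (cs.length + 1) (i+8) 1 := aScan_ge cs (cs.length + 1) (i+8) 1
        -- A's leading slice is exactly the pattern
        have e1 : PySem.List.slice cs (some (i : Int)) (some ((i : Int) + 8)) = ttPat := by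
          have e8 : (i : Int) + 8 = ((i + 8 : Nat) : Int) := by push_cast; ring
          rw [e8, PySem.List.slice_natCast]
          have e : i + 8 - i = 8 := by omega
          rw [e, ← ht, List.take_left' (by decide)]
        -- A's content slice in Nat form
        have e2 : PySem.List.slice cs (some ((i : Int) + 8))
              (some ((aScan cs (cs.length + 1) (i+8) 1 : Int) - 1)) =
            (cs.drop (i+8)).take (aScan cs (cs.length + 1) (i+8) 1 - 1 - (i+8)) := by
          have e8 : (i : Int) + 8 = ((i + 8 : Nat) : Int) := by push_cast; ring
          have ec : ((aScan cs (cs.length + 1) (i+8) 1 : Nat) : Int) - 1 =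
              ((aScan cs (cs.length + 1) (i+8) 1 - 1 : Nat) : Int) := by
            omega
          rw [e8, ec, PySem.List.slice_natCast]
        -- B's buffer minus its final char is A's content slice
        have e3 : PySem.List.slice
              ((cs.drop (i+8)).take (aScan cs (cs.length + 1) (i+8) 1 - (i+8))) none (some (-1)) =
            (cs.drop (i+8)).take (aScan cs (cs.length + 1) (i+8) 1 - 1 - (i+8)) := by
          rw [PySem.List.slice_to_neg_one, List.dropLast_eq_take, List.length_take,
            List.length_drop, List.take_take]
          congr 1
          omega
        rw [e1, e2, hb]
        simp only [List.nil_append, e3]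
        rw [ih (aScan cs (cs.length + 1) (i+8) 1) (by omega)]
      · -- ordinary position: both emit one char
        have hsw : ¬ (PySem.Chars.startswith (cs.drop i) ttPat = true) :=
          fun h => hpre ((PySem.Chars.startswith_iff _ _).1 h)
        rw [aLoop_cons cs m i hi (by omega) hpre, bLoop_succ, dif_pos hi, if_neg hsw]
        congr 1
        exact ih (i+1) (by omega)
    · rw [aLoop_nil cs _ i (by omega), bLoop_nil cs _ i (by omega)]

-- ===== VERDICT (by name: the statement is the Claim_ definition above) =====
theorem fix_texttt_linebreaks_spec : Claim_equal_fix_texttt_linebreaks := by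
  intro content _
  unfold Spec_fix_texttt_linebreaks fix_texttt_linebreaks fix_texttt_linebreaks_alt
  exact congrArg String.ofList
    (loop_eq content.toList (content.toList.length + 1) 0 (by omega))
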